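-- pv_equiv track=rewrite | github.com/radical-collaboration/IMPRESS | examples/discontinuous_scaffolds/scripts/create_redesign.py | _parse_contig
-- ===== SOURCE A (Python) =====
-- def _parse_contig(contig_str: str) -> dict:
--     """Return {(chain, resnum): chai1_seq_pos} (1-indexed)."""
--     mapping: dict[tuple[str, int], int] = {}
--     pos = 1
--     for token in contig_str.split(","):
--         token = token.strip()
--         if not token:
--             continue
--         if token[0].isalpha():
--             chain = token[0]
--             rest = token[1:]
--             if "-" in rest:
--                 start_s, end_s = rest.split("-", 1)
--                 for resnum in range(int(start_s), int(end_s) + 1):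
--                     mapping[(chain, resnum)] = pos
--                     pos += 1
--             else:
--                 mapping[(chain, int(rest))] = pos
--                 pos += 1
--         else:
--             pos += int(token)
--     return mapping
-- ===== SOURCE B (Python) =====
-- def _parse_contig(contig_str: str) -> dict:
--     """Return {(chain, resnum): chai1_seq_pos} (1-indexed)."""
--     # Recursively turn the token list into a flat list of ((chain, resnum), pos)
--     # pairs, locating the range dash with find/slices, then build the dict once.
--     def emit(tokens, pos):
--         if not tokens:
--             return []
--         tok, tail = tokens[0].strip(), tokens[1:]
--         if not tok:
--             return emit(tail, pos)
--         if not tok[0].isalpha():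
--             return emit(tail, pos + int(tok))
--         chain, body = tok[0], tok[1:]
--         cut = body.find("-")
--         if cut < 0:
--             return [((chain, int(body)), pos)] + emit(tail, pos + 1)
--         lo = int(body[:cut])
--         n = max(int(body[cut + 1:]) - lo + 1, 0)
--         return [((chain, lo + i), pos + i) for i in range(n)] + emit(tail, pos + n)
--
--     return dict(emit(contig_str.split(","), 1))
-- ===== Notes on version B (the rewrite author's own statement) =====
-- stated objective: alternative
-- what changed: A threads a mutable position counter through one loop that inserts into the dict token by token; B recursively expands the token list into a flat ((chain,resnum),pos) pair list (locating the range dash with find/slices and computing the range width as max(hi-lo+1,0)) and builds the dict once at the end.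
import Mathlib
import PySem

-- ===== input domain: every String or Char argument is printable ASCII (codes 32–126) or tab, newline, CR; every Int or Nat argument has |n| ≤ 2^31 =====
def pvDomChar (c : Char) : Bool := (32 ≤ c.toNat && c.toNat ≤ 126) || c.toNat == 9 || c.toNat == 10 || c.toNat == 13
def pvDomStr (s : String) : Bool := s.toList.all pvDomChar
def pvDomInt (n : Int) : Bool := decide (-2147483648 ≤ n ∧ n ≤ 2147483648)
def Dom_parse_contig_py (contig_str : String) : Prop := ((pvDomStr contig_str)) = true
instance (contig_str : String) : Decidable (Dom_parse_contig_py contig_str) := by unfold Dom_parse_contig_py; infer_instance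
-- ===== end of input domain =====

-- B replaces A's dict-inserting loop with a mutable position counter by a recursive expansion of the token list into a
-- flat ((chain,resnum),pos) pair list (range dash located with find/slices, width max(hi-lo+1,0)) and one dict() at the
-- end; objective: alternative decomposition, same asymptotic cost.

-- ===== PORT A =====
-- A's loop body: state is (mapping, pos); `.getD 0` stands where Python's int() would raise ValueError (excluded by Pre_).
def pcStepA (st : PySem.Dict (String × Int) Int × Int) (token : List Char) :
    PySem.Dict (String × Int) Int × Int :=
  match PySem.Chars.strip token with
  | [] => st                                     -- 'if not token: continue'
  | c :: rest =>
    if PySem.Chars.isalpha c then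
      if PySem.Chars.isIn ['-'] rest then
        match PySem.Chars.splitOnMax rest ['-'] 1 with
        | a :: b :: _ =>
          (PySem.List.pyRange ((PySem.Int.ofChars? a).getD 0) (((PySem.Int.ofChars? b).getD 0) + 1) 1).foldl
            (fun st r => (st.1.insert (String.ofList [c], r) st.2, st.2 + 1)) st
        | _ => st                                -- unreachable: '-' ∈ rest gives ≥ 2 pieces
      else (st.1.insert (String.ofList [c], (PySem.Int.ofChars? rest).getD 0) st.2, st.2 + 1)
    else (st.1, st.2 + (PySem.Int.ofChars? (c :: rest)).getD 0)

def parse_contig_py (contig_str : String) : List (String × Int × Int) :=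
  (((PySem.Chars.splitOn contig_str.toList [',']).foldl pcStepA (PySem.Dict.empty, 1)).1.items).map
    (fun p => (p.1.1, p.1.2, p.2))

-- ===== PORT B =====
-- Source B's emit: recursion over the token list, producing the flat ((chain,resnum),pos) pair list.
def pcEmit (tokens : List (List Char)) (pos : Int) : List ((String × Int) × Int) :=
  match tokens with
  | [] => []
  | raw :: tail =>
    match PySem.Chars.strip raw with
    | [] => pcEmit tail pos
    | c :: body =>
      if !PySem.Chars.isalpha c then pcEmit tail (pos + (PySem.Int.ofChars? (c :: body)).getD 0)
      else
        let cut := PySem.Chars.find body ['-']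
        if cut < 0 then
          ((String.ofList [c], (PySem.Int.ofChars? body).getD 0), pos) :: pcEmit tail (pos + 1)
        else
          let lo := (PySem.Int.ofChars? (PySem.List.slice body none (some cut))).getD 0
          let n := max ((PySem.Int.ofChars? (PySem.List.slice body (some (cut + 1)) none)).getD 0 - lo + 1) 0
          ((PySem.List.pyRange 0 n 1).map (fun i => ((String.ofList [c], lo + i), pos + i)))
            ++ pcEmit tail (pos + n)

def parse_contig_py_alt (contig_str : String) : List (String × Int × Int) :=
  ((PySem.Dict.ofList (pcEmit (PySem.Chars.splitOn contig_str.toList [',']) 1)).items).map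
    (fun p => (p.1.1, p.1.2, p.2))

-- ===== PRECONDITION & SPEC =====
-- Pre_ excludes exactly the inputs where A's int() raises ValueError (a token that is not int-parseable in its place).
def pcTokOK (raw : List Char) : Bool :=
  match PySem.Chars.strip raw with
  | [] => true
  | c :: rest =>
    if PySem.Chars.isalpha c then
      if PySem.Chars.isIn ['-'] rest then
        match PySem.Chars.splitOnMax rest ['-'] 1 with
        | a :: b :: _ => (PySem.Int.ofChars? a).isSome && (PySem.Int.ofChars? b).isSome
        | _ => false
      else (PySem.Int.ofChars? rest).isSome
    else (PySem.Int.ofChars? (c :: rest)).isSome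

def Pre_parse_contig_py (contig_str : String) : Prop :=
  (PySem.Chars.splitOn contig_str.toList [',']).all pcTokOK = true
instance (contig_str : String) : Decidable (Pre_parse_contig_py contig_str) := by
  unfold Pre_parse_contig_py; infer_instance

def pvWitness_parse_contig_py : String := "A1-3, 10 ,B5"

def Spec_parse_contig_py (contig_str : String) (out : List (String × Int × Int)) : Prop :=
  out = parse_contig_py_alt contig_str
instance (contig_str : String) (out : List (String × Int × Int)) : Decidable (Spec_parse_contig_py contig_str out) := by
  unfold Spec_parse_contig_py; infer_instance

-- ===== CLAIM (what is proved, stated in full; the proofs are below) =====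
def Claim_equal_parse_contig_py : Prop := ∀ (contig_str : String), Dom_parse_contig_py contig_str → Pre_parse_contig_py contig_str → Spec_parse_contig_py contig_str (parse_contig_py contig_str)

-- ===== LEMMAS AND PROOFS =====

-- the dict-insertion step shared by both sides' descriptions
def pcIns (d : PySem.Dict (String × Int) Int) (p : (String × Int) × Int) : PySem.Dict (String × Int) Int :=
  d.insert p.1 p.2

-- find on a single-character needle is the index of the first occurrence
lemma find_go_single (l : List Char) : ∀ (k : Nat),
    PySem.Chars.find.go ['-'] l k = if '-' ∈ l then ((k + l.idxOf '-' : Nat) : Int) else -1 := by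
  induction l with
  | nil => intro k; simp [PySem.Chars.find.go]
  | cons c t ih =>
    intro k
    by_cases hc : c = '-'
    · subst hc
      simp [PySem.Chars.find.go, List.isPrefixOf, List.idxOf_cons_self]
    · have hp : List.isPrefixOf ['-'] (c :: t) = false := by
        simp [List.isPrefixOf]; exact Ne.symm hc
      simp only [PySem.Chars.find.go, hp, Bool.false_eq_true, if_false]
      rw [ih (k + 1)]
      by_cases hm : '-' ∈ t
      · simp [hm, List.idxOf_cons_ne t hc]
        ring
      · simp [hm, Ne.symm hc]

lemma find_single (l : List Char) :
    PySem.Chars.find l ['-'] = if '-' ∈ l then (l.idxOf '-' : Int) else -1 := by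
  rw [PySem.Chars.find, find_go_single l 0]
  simp

-- splitOnMax.go with 0 splits left flushes the rest
lemma spm_go_zero (fuel : Nat) (l cur : List Char) (acc : List (List Char)) :
    PySem.Chars.splitOnMax.go ['-'] fuel 0 l cur acc = ((cur.reverse ++ l) :: acc).reverse := by
  cases fuel with
  | zero => simp [PySem.Chars.splitOnMax.go]
  | succ f =>
    cases l with
    | nil => simp [PySem.Chars.splitOnMax.go]
    | cons c t => simp [PySem.Chars.splitOnMax.go]

-- splitOnMax.go with 1 split left: cut at the first '-' (if any)
lemma spm_go_one (l : List Char) : ∀ (fuel : Nat) (cur : List Char) (acc : List (List Char)),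
    l.length < fuel →
    PySem.Chars.splitOnMax.go ['-'] fuel 1 l cur acc =
      if '-' ∈ l then acc.reverse ++ [cur.reverse ++ l.take (l.idxOf '-'), l.drop (l.idxOf '-' + 1)]
      else acc.reverse ++ [cur.reverse ++ l] := by
  induction l with
  | nil =>
    intro fuel cur acc h
    cases fuel with
    | zero => omega
    | succ f => simp [PySem.Chars.splitOnMax.go]
  | cons c t ih =>
    intro fuel cur acc h
    cases fuel with
    | zero => omega
    | succ f =>
      by_cases hc : c = '-'
      · subst hc
        have hp : List.isPrefixOf ['-'] ('-' :: t) = true := by simp [List.isPrefixOf]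
        simp only [PySem.Chars.splitOnMax.go, hp]
        norm_num
        rw [spm_go_zero]
        simp
      · have hp : List.isPrefixOf ['-'] (c :: t) = false := by
          simp [List.isPrefixOf]; exact Ne.symm hc
        simp only [PySem.Chars.splitOnMax.go, hp]
        norm_num
        rw [ih f (c :: cur) acc (by simpa using Nat.lt_of_succ_lt_succ h)]
        by_cases hm : '-' ∈ t
        · simp [hm, Ne.symm hc, List.idxOf_cons_ne t hc]
        · simp [hm, Ne.symm hc]

lemma splitOnMax_single (l : List Char) :
    PySem.Chars.splitOnMax l ['-'] 1 =
      if '-' ∈ l then [l.take (l.idxOf '-'), l.drop (l.idxOf '-' + 1)] else [l] := by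
  rw [PySem.Chars.splitOnMax]
  norm_num
  rw [spm_go_one l (l.length + 1) [] [] (by omega)]
  split_ifs <;> simp

-- A's inner range loop, rebased to B's 0-based range of pairs
lemma foldl_ins_range (ch : String) (lo : Int) (m : Nat) :
    ∀ (d : PySem.Dict (String × Int) Int) (pos : Int),
    ((List.range m).map (fun (k : Nat) => lo + (k : Int))).foldl
        (fun st r => (st.1.insert (ch, r) st.2, st.2 + 1)) (d, pos)
      = (((List.range m).map (fun (k : Nat) => ((ch, lo + (k : Int)), pos + (k : Int)))).foldl pcIns d,
         pos + (m : Int)) := by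
  induction m with
  | zero => intro d pos; simp
  | succ m ih =>
    intro d pos
    rw [List.range_succ]
    simp only [List.map_append, List.map_cons, List.map_nil, List.foldl_append, List.foldl_cons,
      List.foldl_nil]
    rw [ih]
    simp only [pcIns]
    exact Prod.ext rfl (by push_cast; ring)

lemma foldl_ins_pyRange (ch : String) (lo hi : Int)
    (d : PySem.Dict (String × Int) Int) (pos : Int) :
    (PySem.List.pyRange lo (hi + 1) 1).foldl
        (fun st r => (st.1.insert (ch, r) st.2, st.2 + 1)) (d, pos)
      = (((PySem.List.pyRange 0 (max (hi - lo + 1) 0) 1).map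
            (fun i => ((ch, lo + i), pos + i))).foldl pcIns d,
         pos + max (hi - lo + 1) 0) := by
  have h1 : max (hi - lo + 1) 0 = ((hi + 1 - lo).toNat : Int) := by omega
  rw [PySem.List.pyRange_one lo (hi + 1), PySem.List.pyRange_one 0 (max (hi - lo + 1) 0), h1]
  have h2 : (((hi + 1 - lo).toNat : Int) - 0).toNat = (hi + 1 - lo).toNat := by omega
  rw [h2, foldl_ins_range ch lo ((hi + 1 - lo).toNat) d pos]
  simp [List.map_map, Function.comp_def]

-- per-token pair segment and width, phrased on A's shapes
def pcSeg (raw : List Char) (pos : Int) : List ((String × Int) × Int) :=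
  match PySem.Chars.strip raw with
  | [] => []
  | c :: rest =>
    if PySem.Chars.isalpha c then
      if PySem.Chars.isIn ['-'] rest then
        match PySem.Chars.splitOnMax rest ['-'] 1 with
        | a :: b :: _ =>
          (PySem.List.pyRange 0
              (max (((PySem.Int.ofChars? b).getD 0) - ((PySem.Int.ofChars? a).getD 0) + 1) 0) 1).map
            (fun i => ((String.ofList [c], ((PySem.Int.ofChars? a).getD 0) + i), pos + i))
        | _ => []
      else [((String.ofList [c], (PySem.Int.ofChars? rest).getD 0), pos)]
    else []

def pcW (raw : List Char) : Int :=
  match PySem.Chars.strip raw with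
  | [] => 0
  | c :: rest =>
    if PySem.Chars.isalpha c then
      if PySem.Chars.isIn ['-'] rest then
        match PySem.Chars.splitOnMax rest ['-'] 1 with
        | a :: b :: _ => max (((PySem.Int.ofChars? b).getD 0) - ((PySem.Int.ofChars? a).getD 0) + 1) 0
        | _ => 0
      else 1
    else (PySem.Int.ofChars? (c :: rest)).getD 0

-- one A-step inserts exactly the segment's pairs and advances pos by the width
lemma stepA_eq (raw : List Char) (d : PySem.Dict (String × Int) Int) (pos : Int) :
    pcStepA (d, pos) raw = ((pcSeg raw pos).foldl pcIns d, pos + pcW raw) := by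
  unfold pcStepA pcSeg pcW
  cases h : PySem.Chars.strip raw with
  | nil => simp
  | cons c rest =>
    by_cases ha : PySem.Chars.isalpha c = true
    · simp only [ha, if_true]
      by_cases hm : PySem.Chars.isIn ['-'] rest = true
      · simp only [hm, if_true]
        cases hs : PySem.Chars.splitOnMax rest ['-'] 1 with
        | nil => simp
        | cons a t =>
          cases t with
          | nil =>
            exfalso
            have : '-' ∈ rest := by
              have := (PySem.Chars.isIn_iff_infix ['-'] rest).mp hm
              exact (List.singleton_infix_iff '-' rest).mp this
            rw [splitOnMax_single rest, if_pos this] at hs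
            simp at hs
          | cons b t' => exact foldl_ins_pyRange (String.ofList [c]) _ _ d pos
      · simp [hm, pcIns]
    · simp [ha]

-- one B-step emits exactly the segment's pairs and recurses at pos + width
lemma emit_cons (raw : List Char) (tail : List (List Char)) (pos : Int) :
    pcEmit (raw :: tail) pos = pcSeg raw pos ++ pcEmit tail (pos + pcW raw) := by
  rw [pcEmit]
  unfold pcSeg pcW
  cases h : PySem.Chars.strip raw with
  | nil => simp
  | cons c body =>
    by_cases ha : PySem.Chars.isalpha c = true
    · simp only [ha, Bool.not_true, Bool.false_eq_true, if_false, if_true]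
      by_cases hmem : '-' ∈ body
      · have hin : PySem.Chars.isIn ['-'] body = true :=
          (PySem.Chars.isIn_iff_infix ['-'] body).mpr ((List.singleton_infix_iff '-' body).mpr hmem)
        have hfind : PySem.Chars.find body ['-'] = (body.idxOf '-' : Int) := by
          rw [find_single, if_pos hmem]
        have hcutpos : ¬ PySem.Chars.find body ['-'] < 0 := by rw [hfind]; omega
        rw [splitOnMax_single body, if_pos hmem]
        simp only [hin, if_true, hfind]
        rw [if_neg (by rw [← hfind]; exact hcutpos)]
        rw [PySem.List.slice_to body (b := (body.idxOf '-' : Int)) (by omega)]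
        rw [PySem.List.slice_from body (a := ((body.idxOf '-' : Int) + 1)) (by omega)]
        have h1 : ((body.idxOf '-' : Int)).toNat = body.idxOf '-' := by omega
        have h2 : ((body.idxOf '-' : Int) + 1).toNat = body.idxOf '-' + 1 := by omega
        rw [h1, h2]
      · have hin : PySem.Chars.isIn ['-'] body = false := by
          rw [PySem.Chars.isIn_eq_false_iff]
          exact fun hinf => hmem ((List.singleton_infix_iff '-' body).mp hinf)
        have hfind : PySem.Chars.find body ['-'] = -1 := by
          rw [find_single, if_neg hmem]
        simp [hin, hfind]
    · simp [ha]

-- main invariant: A's fold over tokens = insert-fold of B's emitted pair list, pos advanced by the total width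
lemma main_inv (toks : List (List Char)) :
    ∀ (d : PySem.Dict (String × Int) Int) (pos : Int),
    toks.foldl pcStepA (d, pos)
      = ((pcEmit toks pos).foldl pcIns d, pos + (toks.map pcW).sum) := by
  induction toks with
  | nil => intro d pos; simp [pcEmit]
  | cons raw tail ih =>
    intro d pos
    simp only [List.foldl_cons, List.map_cons, List.sum_cons]
    rw [stepA_eq, ih, emit_cons, List.foldl_append]
    exact Prod.ext rfl (by ring)

theorem parse_contig_py_spec_aux (contig_str : String) :
    parse_contig_py contig_str = parse_contig_py_alt contig_str := by
  unfold parse_contig_py parse_contig_py_alt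
  rw [main_inv]
  rfl

-- ===== VERDICT (by name: the statement is the Claim_ definition above) =====
theorem parse_contig_py_spec : Claim_equal_parse_contig_py := by
  intro s _ _
  unfold Spec_parse_contig_py
  exact parse_contig_py_spec_aux s
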